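-- pv_equiv track=rewrite | github.com/vkovinicTT/tt-swiss | memory_profiler/mlir_parser.py | find_top_level_arrow
-- ===== SOURCE A (Python) =====
-- def find_top_level_arrow(s: str) -> int:
--     """
--     Find the position of ' -> ' that is not inside angle brackets or parentheses.
--
--     This handles cases like:
--         (tensor<..., #ttnn.ttnn_layout<(d0) -> (0, d0), ...>>) -> tensor<...>
--
--     Args:
--         s: String to search in
--
--     Returns:
--         Position of the top-level ' -> ', or -1 if not found
--     """
--     depth_angle = 0
--     depth_paren = 0
--     i = 0
--     while i < len(s) - 3:
--         c = s[i]
--         if c == "<":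
--             depth_angle += 1
--         elif c == ">":
--             # Don't count '>' that's part of '->'
--             if i > 0 and s[i - 1] == "-":
--                 pass  # Skip, this is part of '->'
--             else:
--                 depth_angle -= 1
--         elif c == "(":
--             depth_paren += 1
--         elif c == ")":
--             depth_paren -= 1
--
--         if depth_angle == 0 and depth_paren == 0 and s[i : i + 4] == " -> ":
--             return i
--         i += 1
--     return -1
-- ===== SOURCE B (Python) =====
-- def find_top_level_arrow(s: str) -> int:
--     start = 0
--     while True:
--         i = s.find(' -> ', start)
--         if i == -1:
--             return -1
--         pre = s[:i]
--         if (pre.count('<') + pre.count('->') == pre.count('>')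
--                 and pre.count('(') == pre.count(')')):
--             return i
--         start = i + 1
-- ===== Notes on version B (the rewrite author's own statement) =====
-- stated objective: faster
-- what changed: Instead of a fused character-by-character scan maintaining running angle/paren depths, B jumps between candidate arrow occurrences with str.find and decides top-levelness of each candidate by counting the bracket characters and arrow tokens in the prefix before it.
import Mathlib
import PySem

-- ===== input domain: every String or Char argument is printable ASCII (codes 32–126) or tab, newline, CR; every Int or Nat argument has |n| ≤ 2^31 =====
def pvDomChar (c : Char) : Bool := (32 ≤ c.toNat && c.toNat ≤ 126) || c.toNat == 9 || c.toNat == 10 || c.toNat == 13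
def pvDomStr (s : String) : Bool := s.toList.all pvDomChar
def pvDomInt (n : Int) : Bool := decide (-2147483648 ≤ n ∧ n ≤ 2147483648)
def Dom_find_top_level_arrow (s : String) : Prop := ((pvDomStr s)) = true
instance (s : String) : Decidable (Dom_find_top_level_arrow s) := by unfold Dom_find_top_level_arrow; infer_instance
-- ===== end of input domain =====

-- ===== PORT A =====
-- B replaces A's fused depth-tracking scan by find-based candidate jumps plus prefix counting (objective: faster; a timing run measured B faster).
def pvArrow : List Char := [' ', '-', '>', ' ']

def pvALoop (cs : List Char) (i : Nat) (da dp : Int) : Int :=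
  if i + 3 < cs.length then
    -- c = s[i]; in range under the loop guard, so getD's default is never used
    let c := cs.getD i ' '
    let p : Int × Int :=
      if c = '<' then (da + 1, dp)
      else if c = '>' then
        (if 0 < i ∧ cs.getD (i - 1) ' ' = '-' then (da, dp) else (da - 1, dp))
      else if c = '(' then (da, dp + 1)
      else if c = ')' then (da, dp - 1)
      else (da, dp)
    if p.1 = 0 ∧ p.2 = 0 ∧ PySem.Chars.slice cs (some (i : Int)) (some ((i : Int) + 4)) = pvArrow
    then (i : Int)
    else pvALoop cs (i + 1) p.1 p.2
  else -1
termination_by cs.length - i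

def find_top_level_arrow (s : String) : Int := pvALoop s.toList 0 0 0

-- ===== PORT B =====
-- Termination helper for pvBLoop (the port cites it in decreasing_by): a successful find
-- returns an in-range index not below the start position.
lemma pvFind_go_cases (sub l : List Char) (k : Nat) :
    PySem.Chars.find.go sub l k = -1 ∨
    ∃ m : Nat, PySem.Chars.find.go sub l k = ((k + m : Nat) : Int) ∧
      sub.isPrefixOf (l.drop m) = true ∧ ∀ m' < m, sub.isPrefixOf (l.drop m') = false := by
  induction l generalizing k with
  | nil =>
    by_cases he : sub.isEmpty
    · right
      refine ⟨0, ?_, ?_, by omega⟩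
      · simp [PySem.Chars.find.go, he]
      · simp [List.isEmpty_iff] at he; simp [he]
    · left; simp [PySem.Chars.find.go, he]
  | cons a t ih =>
    by_cases hp : sub.isPrefixOf (a :: t)
    · right
      exact ⟨0, by simp [PySem.Chars.find.go, hp], by simpa using hp, by omega⟩
    · rcases ih (k + 1) with h | ⟨m, hm, hpre, hall⟩
      · left; simp [PySem.Chars.find.go, hp, h]
      · right
        refine ⟨m + 1, ?_, by simpa using hpre, ?_⟩
        · rw [show PySem.Chars.find.go sub (a :: t) k = PySem.Chars.find.go sub t (k+1) by
            simp [PySem.Chars.find.go, hp]]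
          rw [hm]; norm_num; omega
        · intro m' hm'
          cases m' with
          | zero => simp only [List.drop_zero]; exact Bool.not_eq_true _ ▸ (by simpa using hp)
          | succ n => simpa using hall n (by omega)

lemma pvFindFrom_bounds (cs sub : List Char) (start : Nat) (hsub : sub ≠ [])
    (h : PySem.Chars.findFrom cs sub (start : Int) none ≠ -1) :
    start ≤ (PySem.Chars.findFrom cs sub (start : Int) none).toNat ∧
    (PySem.Chars.findFrom cs sub (start : Int) none).toNat + sub.length ≤ cs.length := by
  unfold PySem.Chars.findFrom at *
  simp only [Int.not_lt.mpr (Int.natCast_nonneg start), if_false] at *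
  by_cases hle : (cs.length : Int) < (start : Int)
  · simp [hle] at h
  · simp only [hle, if_false] at h ⊢
    have hst : ((start : Int)).toNat = start := Int.toNat_natCast start
    have htake : List.take ((cs.length : Int)).toNat cs = cs := by simp
    rcases pvFind_go_cases sub (List.drop start cs) 0 with hc | ⟨m, hm, hpre, -⟩
    · exfalso; apply h
      simp [PySem.Chars.find, hst, htake, hc]
    · have hfind : PySem.Chars.find (List.drop ((start:Int)).toNat (List.take ((cs.length:Int)).toNat cs)) sub = ((m:Nat) : Int) := by
        simp [PySem.Chars.find, hst, htake, hm]
      simp only [hfind] at h ⊢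
      have hne : ((m : Nat) : Int) ≠ -1 := by omega
      simp only [hne, if_false] at h ⊢
      have hlen : sub.length ≤ (List.drop m (List.drop start cs)).length :=
        (List.isPrefixOf_iff_prefix.mp hpre).length_le
      have hd : (List.drop m (List.drop start cs)).length = cs.length - start - m := by simp; omega
      have h1 : 1 ≤ sub.length := List.length_pos_of_ne_nil hsub
      rw [hd] at hlen
      constructor <;> omega

def pvBLoop (cs : List Char) (start : Nat) : Int :=
  let i := PySem.Chars.findFrom cs pvArrow (start : Int) none
  if h : i = -1 then -1
  else
    let pre := PySem.Chars.slice cs none (some i)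
    if PySem.Chars.count pre ['<'] + PySem.Chars.count pre ['-', '>'] = PySem.Chars.count pre ['>'] ∧
       PySem.Chars.count pre ['('] = PySem.Chars.count pre [')'] then i
    else pvBLoop cs (i.toNat + 1)
termination_by cs.length + 1 - start
decreasing_by
  have hb := pvFindFrom_bounds cs pvArrow start (by simp [pvArrow]) h
  have hl : pvArrow.length = 4 := rfl
  omega

def find_top_level_arrow_alt (s : String) : Int := pvBLoop s.toList 0

-- ===== PRECONDITION & SPEC =====
def Spec_find_top_level_arrow (s : String) (out : Int) : Prop := out = find_top_level_arrow_alt s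
instance (s : String) (out : Int) : Decidable (Spec_find_top_level_arrow s out) := by unfold Spec_find_top_level_arrow; infer_instance

-- ===== CLAIM (what is proved, stated in full; the proofs are below) =====
def Claim_equal_find_top_level_arrow : Prop := ∀ (s : String), Dom_find_top_level_arrow s → Spec_find_top_level_arrow s (find_top_level_arrow s)

-- ===== LEMMAS AND PROOFS =====

-- number of positions j ≥ 1 with l[j-1] = '-' and l[j] = '>' (the '>' characters A's scan skips)
def pvPairs : List Char → Nat
  | a :: b :: t => (if a = '-' ∧ b = '>' then 1 else 0) + pvPairs (b :: t)
  | _ => 0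

def pvDAng (l : List Char) : Int := (l.count '<' : Int) - (l.count '>' : Int) + (pvPairs l : Int)
def pvDPar (l : List Char) : Int := (l.count '(' : Int) - (l.count ')' : Int)

def pvMatchAtB (cs : List Char) (i : Nat) : Bool :=
  decide ((cs.drop i).take 4 = pvArrow) && decide (pvDAng (cs.take i) = 0) && decide (pvDPar (cs.take i) = 0)

def pvFirst (cs : List Char) (i : Nat) : Int :=
  if i + 3 < cs.length then
    if pvMatchAtB cs i then (i : Int) else pvFirst cs (i + 1)
  else -1
termination_by cs.length - i

lemma pvCountGo_single (c : Char) : ∀ (fuel : Nat) (l : List Char) (acc : Nat), l.length ≤ fuel →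
    PySem.Chars.count.go [c] fuel l acc = acc + l.count c := by
  intro fuel
  induction fuel with
  | zero => intro l acc h; cases l with
    | nil => simp [PySem.Chars.count.go]
    | cons a t => simp at h
  | succ n ih =>
    intro l acc h
    cases l with
    | nil => simp [PySem.Chars.count.go]
    | cons a t =>
      by_cases hc : c = a
      · have hp : [c].isPrefixOf (a :: t) = true := by simp [hc]
        rw [show PySem.Chars.count.go [c] (n+1) (a::t) acc
            = PySem.Chars.count.go [c] n (List.drop 1 (a::t)) (acc+1) by
          simp [PySem.Chars.count.go, hp]]
        simp only [List.drop_one, List.tail_cons]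
        rw [ih t (acc+1) (by simpa using h)]
        simp [hc, List.count_cons]
        omega
      · have hp : [c].isPrefixOf (a :: t) = false := by
          simp [List.isPrefixOf, hc]
        rw [show PySem.Chars.count.go [c] (n+1) (a::t) acc
            = PySem.Chars.count.go [c] n t acc by simp [PySem.Chars.count.go, hp]]
        rw [ih t acc (by simpa using h)]
        simp [List.count_cons, Ne.symm hc, hc]

lemma pvCount_single (l : List Char) (c : Char) : PySem.Chars.count l [c] = l.count c := by
  rw [show PySem.Chars.count l [c] = PySem.Chars.count.go [c] l.length l 0 by
    simp [PySem.Chars.count]]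
  simpa using pvCountGo_single c l.length l 0 le_rfl

lemma pvPairs_gt (t : List Char) : pvPairs ('>' :: t) = pvPairs t := by
  cases t with
  | nil => rfl
  | cons b t' => simp [pvPairs]

lemma pvCountGo_pair : ∀ (fuel : Nat) (l : List Char) (acc : Nat), l.length ≤ fuel →
    PySem.Chars.count.go ['-','>'] fuel l acc = acc + pvPairs l := by
  intro fuel
  induction fuel with
  | zero => intro l acc h; cases l with
    | nil => simp [PySem.Chars.count.go, pvPairs]
    | cons a t => simp at h
  | succ n ih =>
    intro l acc h
    cases l with
    | nil => simp [PySem.Chars.count.go, pvPairs]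
    | cons a t =>
      by_cases hp : ['-','>'].isPrefixOf (a :: t) = true
      · obtain ⟨t', rfl, rfl⟩ : ∃ t', t = '>' :: t' ∧ a = '-' := by
          cases t with
          | nil => simp at hp
          | cons b t' => simp at hp; exact ⟨t', by simp [hp.2.symm], hp.1.symm⟩
        rw [show PySem.Chars.count.go ['-','>'] (n+1) ('-'::'>'::t') acc
            = PySem.Chars.count.go ['-','>'] n (List.drop 2 ('-'::'>'::t')) (acc+1) by
          simp [PySem.Chars.count.go, hp]]
        simp only [List.drop_succ_cons, List.drop_zero, List.drop_one]
        rw [ih _ (acc+1) (by simp at h ⊢; omega)]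
        simp [pvPairs, pvPairs_gt]
        omega
      · rw [show PySem.Chars.count.go ['-','>'] (n+1) (a::t) acc
            = PySem.Chars.count.go ['-','>'] n t acc by simp [PySem.Chars.count.go, hp]]
        rw [ih t acc (by simpa using h)]
        cases t with
        | nil => simp [pvPairs]
        | cons b t' =>
          have hnot : ¬ (a = '-' ∧ b = '>') := by
            intro ⟨h1, h2⟩; apply hp; subst h1 h2; simp [List.isPrefixOf]
          simp [pvPairs, hnot]

lemma pvCount_arrowpair (l : List Char) : PySem.Chars.count l ['-', '>'] = pvPairs l := by
  rw [show PySem.Chars.count l ['-','>'] = PySem.Chars.count.go ['-','>'] l.length l 0 by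
    simp [PySem.Chars.count]]
  simpa using pvCountGo_pair l.length l 0 le_rfl

lemma pvPairs_append (l : List Char) (c : Char) :
    pvPairs (l ++ [c]) = pvPairs l + (if l.getLast? = some '-' ∧ c = '>' then 1 else 0) := by
  induction l with
  | nil => simp [pvPairs]
  | cons a t ih =>
    cases t with
    | nil => simp [pvPairs]
    | cons b t' =>
      simp only [List.cons_append] at ih ⊢
      rw [show pvPairs (a :: (b :: (t' ++ [c]))) = (if a = '-' ∧ b = '>' then 1 else 0) + pvPairs (b :: (t' ++ [c])) from rfl]
      rw [ih]
      simp [pvPairs, List.getLast?_cons_cons]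
      omega

lemma pvGetLast?_take (cs : List Char) (i : Nat) (h0 : 0 < i) (h : i ≤ cs.length) :
    (cs.take i).getLast? = some (cs.getD (i - 1) ' ') := by
  rw [List.getLast?_eq_getElem?]
  have hlen : (cs.take i).length = i := by simp; omega
  rw [hlen]
  have h1 : i - 1 < cs.length := by omega
  rw [List.getD_eq_getElem?_getD]
  rw [show (List.take i cs)[i-1]? = cs[i-1]? from List.getElem?_take_of_lt (by omega)]
  simp [List.getElem?_eq_getElem h1]

lemma pvTake_succ (cs : List Char) (i : Nat) (h : i < cs.length) :
    cs.take (i + 1) = cs.take i ++ [cs.getD i ' '] := by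
  rw [List.take_add_one, List.getD_eq_getElem?_getD]
  simp [List.getElem?_eq_getElem h]

lemma pvFirst_stop (cs : List Char) (i : Nat) (h : ¬ i + 3 < cs.length) : pvFirst cs i = -1 := by
  unfold pvFirst; simp [h]

lemma pvFirst_skip (cs : List Char) (a b : Nat) (hab : a ≤ b)
    (h : ∀ j, a ≤ j → j < b → pvMatchAtB cs j = false) : pvFirst cs a = pvFirst cs b := by
  suffices H : ∀ n a, b - a ≤ n → a ≤ b → (∀ j, a ≤ j → j < b → pvMatchAtB cs j = false) →
      pvFirst cs a = pvFirst cs b by exact H (b - a) a le_rfl hab h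
  intro n
  induction n with
  | zero =>
    intro a hn hab _
    have heq : a = b := by omega
    subst heq; rfl
  | succ n ih =>
    intro a hn hab hall
    rcases Nat.eq_or_lt_of_le hab with rfl | hlt
    · rfl
    · by_cases hg : a + 3 < cs.length
      · rw [pvFirst]
        simp only [hg, if_true, hall a le_rfl hlt, Bool.false_eq_true, if_false]
        exact ih (a + 1) (by omega) (by omega) (fun j h1 h2 => hall j (by omega) h2)
      · rw [pvFirst_stop cs a hg, pvFirst_stop cs b (by omega)]

lemma pvFirst_none (cs : List Char) (a : Nat)
    (h : ∀ j, a ≤ j → pvMatchAtB cs j = false) : pvFirst cs a = -1 := by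
  suffices H : ∀ n a, cs.length - a ≤ n → (∀ j, a ≤ j → pvMatchAtB cs j = false) →
      pvFirst cs a = -1 by exact H (cs.length - a) a le_rfl h
  intro n
  induction n with
  | zero => intro a hn _; exact pvFirst_stop cs a (by omega)
  | succ n ih =>
    intro a hn hall
    by_cases hg : a + 3 < cs.length
    · rw [pvFirst]
      simp only [hg, if_true, hall a le_rfl, Bool.false_eq_true, if_false]
      exact ih (a + 1) (by omega) (fun j h1 => hall j (by omega))
    · exact pvFirst_stop cs a hg

lemma pvLast_iff (cs : List Char) (i : Nat) (h : i ≤ cs.length) :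
    ((cs.take i).getLast? = some '-') ↔ (0 < i ∧ cs.getD (i - 1) ' ' = '-') := by
  rcases Nat.eq_zero_or_pos i with rfl | h0
  · simp
  · rw [pvGetLast?_take cs i h0 h]
    simp [h0]

-- the depth update A performs at position i, expressed on prefix depths
lemma pvStep_eq (cs : List Char) (i : Nat) (h : i < cs.length) :
    (if cs.getD i ' ' = '<' then (pvDAng (cs.take i) + 1, pvDPar (cs.take i))
     else if cs.getD i ' ' = '>' then
       (if 0 < i ∧ cs.getD (i - 1) ' ' = '-' then (pvDAng (cs.take i), pvDPar (cs.take i))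
        else (pvDAng (cs.take i) - 1, pvDPar (cs.take i)))
     else if cs.getD i ' ' = '(' then (pvDAng (cs.take i), pvDPar (cs.take i) + 1)
     else if cs.getD i ' ' = ')' then (pvDAng (cs.take i), pvDPar (cs.take i) - 1)
     else (pvDAng (cs.take i), pvDPar (cs.take i)))
    = (pvDAng (cs.take (i + 1)), pvDPar (cs.take (i + 1))) := by
  have ht := pvTake_succ cs i h
  have hlast := pvLast_iff cs i (le_of_lt h)
  unfold pvDAng pvDPar
  rw [ht, pvPairs_append]
  simp only [List.count_append, List.count_cons, List.count_nil, hlast, Prod.mk.injEq]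
  set c := cs.getD i ' ' with hc
  by_cases h1 : c = '<'
  · simp [h1, Prod.ext_iff] <;> (try push_cast) <;> omega
  · by_cases h2 : c = '>'
    · by_cases hp0 : 0 < i
      · by_cases hpc : cs[i - 1]?.getD ' ' = '-'
        · simp [h1, h2, hp0, hpc, Prod.ext_iff] <;> (try push_cast) <;> omega
        · simp [h1, h2, hp0, hpc, Prod.ext_iff] <;> (try push_cast) <;> omega
      · simp [h1, h2, hp0, Prod.ext_iff] <;> (try push_cast) <;> omega
    · by_cases h3 : c = '('
      · simp [h1, h2, h3, Prod.ext_iff] <;> (try push_cast) <;> omega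
      · by_cases h4 : c = ')'
        · simp [h1, h2, h3, h4, Prod.ext_iff] <;> (try push_cast) <;> omega
        · simp [h1, h2, h3, h4, Prod.ext_iff] <;> (try push_cast) <;> omega

lemma pvGetD_of_occ (cs : List Char) (i : Nat) (hocc : (cs.drop i).take 4 = pvArrow) :
    cs.getD i ' ' = ' ' := by
  cases hd : cs.drop i with
  | nil => rw [hd] at hocc; simp [pvArrow] at hocc
  | cons x xs =>
    rw [hd] at hocc
    simp only [List.take_succ_cons, pvArrow, List.cons.injEq] at hocc
    have : cs[i]? = some x := by
      rw [show cs[i]? = (cs.drop i)[0]? by simp, hd]; rfl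
    simp [List.getD_eq_getElem?_getD, this, hocc.1]

lemma pvOcc_len (cs : List Char) (i : Nat) (hocc : (cs.drop i).take 4 = pvArrow) :
    i + 4 ≤ cs.length := by
  have := congrArg List.length hocc
  simp [pvArrow] at this
  omega

lemma pvALoop_eq (cs : List Char) (i : Nat) :
    pvALoop cs i (pvDAng (cs.take i)) (pvDPar (cs.take i)) = pvFirst cs i := by
  suffices H : ∀ n i, cs.length - i ≤ n →
      pvALoop cs i (pvDAng (cs.take i)) (pvDPar (cs.take i)) = pvFirst cs i by
    exact H (cs.length - i) i le_rfl
  intro n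
  induction n with
  | zero =>
    intro i hn
    rw [pvALoop, pvFirst]
    simp [show ¬ i + 3 < cs.length by omega]
  | succ n ih =>
    intro i hn
    rw [pvALoop, pvFirst]
    by_cases hg : i + 3 < cs.length
    · simp only [hg, if_true]
      have hi : i < cs.length := by omega
      have hstep := pvStep_eq cs i hi
      rw [hstep]
      have hslice : PySem.Chars.slice cs (some (i : Int)) (some ((i : Int) + 4)) = (cs.drop i).take 4 := by
        show PySem.List.slice cs (some (i : Int)) (some ((i : Int) + 4)) = (cs.drop i).take 4
        rw [show ((i : Int) + 4) = ((i : Int) + ((4 : Nat) : Int)) by norm_num,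
          PySem.List.slice_natCast_add]
      rw [hslice]
      by_cases hocc : (cs.drop i).take 4 = pvArrow
      · have hsp : cs.getD i ' ' = ' ' := pvGetD_of_occ cs i hocc
        have hfix : (pvDAng (cs.take (i+1)), pvDPar (cs.take (i+1))) = (pvDAng (cs.take i), pvDPar (cs.take i)) := by
          rw [← pvStep_eq cs i hi, hsp]; simp
        rw [Prod.mk.injEq] at hfix
        by_cases hz : pvDAng (cs.take (i+1)) = 0 ∧ pvDPar (cs.take (i+1)) = 0
        · have hmt : pvMatchAtB cs i = true := by
            simp [pvMatchAtB, hocc, ← hfix.1, ← hfix.2, hz.1, hz.2]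
          simp [hz.1, hz.2, hocc, hmt]
        · have hcond : ¬ (pvDAng (cs.take (i+1)) = 0 ∧ pvDPar (cs.take (i+1)) = 0 ∧ (cs.drop i).take 4 = pvArrow) := by
            intro ⟨a, b, _⟩; exact hz ⟨a, b⟩
          have hm : pvMatchAtB cs i = false := by
            rw [hfix.1, hfix.2] at hz
            simp only [pvMatchAtB, Bool.and_eq_false_iff, decide_eq_false_iff_not]
            tauto
          simp only [hcond, if_false, hm, Bool.false_eq_true, if_false]
          exact ih (i + 1) (by omega)
      · have hm : pvMatchAtB cs i = false := by
          simp [pvMatchAtB, hocc]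
        have hcond : ¬ (pvDAng (cs.take (i+1)) = 0 ∧ pvDPar (cs.take (i+1)) = 0 ∧ (cs.drop i).take 4 = pvArrow) := by
          intro ⟨_, _, c⟩; exact hocc c
        simp only [hcond, if_false, hm, Bool.false_eq_true, if_false]
        exact ih (i + 1) (by omega)
    · simp [hg]

lemma pvFindFrom_gt (cs sub : List Char) (start : Nat) (h : cs.length < start) :
    PySem.Chars.findFrom cs sub (start : Int) none = -1 := by
  unfold PySem.Chars.findFrom
  have h1 : ¬ ((start : Int) < 0) := Int.not_lt.mpr (Int.natCast_nonneg start)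
  have h2 : (cs.length : Int) < (start : Int) := by exact_mod_cast h
  simp [h1, h2]

lemma pvFindFrom_le (cs sub : List Char) (start : Nat) (h : start ≤ cs.length) :
    PySem.Chars.findFrom cs sub (start : Int) none =
      (if PySem.Chars.find (List.drop start cs) sub = -1 then -1
       else (start : Int) + PySem.Chars.find (List.drop start cs) sub) := by
  unfold PySem.Chars.findFrom
  have h1 : ¬ ((start : Int) < 0) := Int.not_lt.mpr (Int.natCast_nonneg start)
  have h2 : ¬ ((cs.length : Int) < (start : Int)) := by exact_mod_cast Nat.not_lt.mpr h
  simp [h1, h2, Int.toNat_natCast]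

lemma pvNoOcc_of_lt (cs : List Char) (start j m : Nat) (hj : start ≤ j) (hjm : j < start + m)
    (hall : ∀ m' < m, pvArrow.isPrefixOf ((cs.drop start).drop m') = false)
    (hocc : (cs.drop j).take 4 = pvArrow) : False := by
  have hpfx : pvArrow <+: cs.drop j := by
    rw [← hocc]; exact List.take_prefix 4 _
  have hdd : (cs.drop start).drop (j - start) = cs.drop j := by
    rw [List.drop_drop]; congr 1; omega
  have hf := hall (j - start) (by omega)
  rw [hdd] at hf
  have ht : pvArrow.isPrefixOf (cs.drop j) = true := List.isPrefixOf_iff_prefix.mpr hpfx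
  rw [hf] at ht
  exact Bool.false_ne_true ht

lemma pvCond_iff (T : List Char) :
    (pvDAng T = 0 ∧ pvDPar T = 0) ↔
      (T.count '<' + pvPairs T = T.count '>' ∧ T.count '(' = T.count ')') := by
  unfold pvDAng pvDPar; omega

lemma pvBLoop_eq (cs : List Char) (start : Nat) : pvBLoop cs start = pvFirst cs start := by
  suffices H : ∀ n start, cs.length + 1 - start ≤ n → pvBLoop cs start = pvFirst cs start by
    exact H (cs.length + 1 - start) start le_rfl
  intro n
  induction n with
  | zero =>
    intro start hn
    rw [pvBLoop, pvFirst_stop cs start (by omega)]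
    simp [pvFindFrom_gt cs pvArrow start (by omega)]
  | succ n ih =>
    intro start hn
    rw [pvBLoop]
    by_cases hml : start ≤ cs.length
    · have hgo : PySem.Chars.find (List.drop start cs) pvArrow
          = PySem.Chars.find.go pvArrow (List.drop start cs) 0 := rfl
      rcases pvFind_go_cases pvArrow (List.drop start cs) 0 with hc | ⟨m, hm, hpre, hall⟩
      · have hfr : PySem.Chars.findFrom cs pvArrow (start : Int) none = -1 := by
          rw [pvFindFrom_le cs pvArrow start hml, hgo, hc]; simp
        simp only [hfr, dite_eq_ite, if_pos rfl]
        refine (pvFirst_none cs start ?_).symm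
        intro j hj
        simp only [pvMatchAtB, Bool.and_eq_false_iff, decide_eq_false_iff_not]
        left; left
        intro hocc
        have hpfx : pvArrow <+: cs.drop j := by
          rw [← hocc]; exact List.take_prefix 4 _
        have hinf : pvArrow <:+: cs.drop start := by
          have hdd : (cs.drop start).drop (j - start) = cs.drop j := by
            rw [List.drop_drop]; congr 1; omega
          rw [← hdd] at hpfx
          exact hpfx.isInfix.trans (List.drop_suffix (j - start) (cs.drop start)).isInfix
        have := (PySem.Chars.find_eq_neg_one_iff (cs.drop start) pvArrow).mp (by rw [hgo, hc])
        exact this hinf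
      · have hfind : PySem.Chars.find (List.drop start cs) pvArrow = (m : Int) := by
          rw [hgo, hm]; norm_num
        have hne : ¬ (((start + m : Nat) : Int) = -1) := by omega
        have hfr : PySem.Chars.findFrom cs pvArrow (start : Int) none = ((start + m : Nat) : Int) := by
          rw [pvFindFrom_le cs pvArrow start hml, hfind]
          rw [if_neg (by omega : ¬ ((m : Nat) : Int) = -1)]
          push_cast; ring
        have hocc : (cs.drop (start + m)).take 4 = pvArrow := by
          have hdd : (cs.drop start).drop m = cs.drop (start + m) := by
            rw [List.drop_drop]
          have hp := List.isPrefixOf_iff_prefix.mp hpre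
          rw [hdd] at hp
          have heq := List.prefix_iff_eq_take.mp hp
          rw [show (4 : Nat) = pvArrow.length from rfl]
          exact heq.symm
        have hlen4 : start + m + 4 ≤ cs.length := pvOcc_len cs (start + m) hocc
        have hskip : pvFirst cs start = pvFirst cs (start + m) := by
          refine pvFirst_skip cs start (start + m) (by omega) ?_
          intro j hj hjm
          simp only [pvMatchAtB, Bool.and_eq_false_iff, decide_eq_false_iff_not]
          left; left
          exact fun ho => pvNoOcc_of_lt cs start j m hj hjm hall ho
        rw [hskip]
        simp only [hfr, hne, dite_eq_ite, if_false]
        have hslice : PySem.Chars.slice cs none (some ((start + m : Nat) : Int)) = cs.take (start + m) := by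
          show PySem.List.slice cs none (some ((start + m : Nat) : Int)) = cs.take (start + m)
          rw [PySem.List.slice_to_natCast]
        rw [hslice, Int.toNat_natCast]
        rw [pvCount_single, pvCount_single, pvCount_single, pvCount_single, pvCount_arrowpair]
        by_cases hz : pvDAng (cs.take (start + m)) = 0 ∧ pvDPar (cs.take (start + m)) = 0
        · have hcnt := (pvCond_iff (cs.take (start + m))).mp hz
          have hmt : pvMatchAtB cs (start + m) = true := by
            simp [pvMatchAtB, hocc, hz.1, hz.2]
          rw [pvFirst]
          simp [show start + m + 3 < cs.length by omega, hmt, hcnt.1, hcnt.2]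
        · have hcnt : ¬ ((cs.take (start + m)).count '<' + pvPairs (cs.take (start + m)) = (cs.take (start + m)).count '>' ∧ (cs.take (start + m)).count '(' = (cs.take (start + m)).count ')') := by
            rw [← pvCond_iff]; exact hz
          have hmf : pvMatchAtB cs (start + m) = false := by
            simp only [pvMatchAtB, Bool.and_eq_false_iff, decide_eq_false_iff_not]
            tauto
          rw [pvFirst]
          simp only [show start + m + 3 < cs.length by omega, if_true, hmf, Bool.false_eq_true, if_false]
          simp only [hcnt, if_false]
          exact ih (start + m + 1) (by omega)
    · rw [pvFirst_stop cs start (by omega)]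
      simp [pvFindFrom_gt cs pvArrow start (by omega)]

-- ===== VERDICT (by name: the statement is the Claim_ definition above) =====
theorem find_top_level_arrow_spec : Claim_equal_find_top_level_arrow := by
  intro s _
  show find_top_level_arrow s = find_top_level_arrow_alt s
  have h0 : pvDAng ((s.toList).take 0) = 0 := by simp [pvDAng, pvPairs]
  have h0' : pvDPar ((s.toList).take 0) = 0 := by simp [pvDPar]
  calc find_top_level_arrow s = pvALoop s.toList 0 0 0 := rfl
    _ = pvFirst s.toList 0 := by
        have he := pvALoop_eq s.toList 0
        rw [h0, h0'] at he
        exact he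
    _ = pvBLoop s.toList 0 := (pvBLoop_eq s.toList 0).symm
    _ = find_top_level_arrow_alt s := rfl
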